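-- pv_equiv track=rewrite | github.com/KirstieJane/advent-code-2019 | day06/day06_puz2.py | build_orbit_graph
-- ===== SOURCE A (Python) =====
-- def build_orbit_graph(orbit_dict):
--     """Convert the orbit_dict - a directed network - into orbit_graph - an
--     undirected network.
--
--     Parameters
--     ----------
--     orbit_dict : dictionary
--         A dictionary where the keys are the moon objects in teh
--
--     Returns
--     -------
--     orbit_graph : dictionary
--         A dictionary where the keys are every object in the map and the values
--         are a list of objects that each object is connected to (either
--         orbiting or being orbited by).
--     """
--
--     # Create an empty graph
--     orbit_graph = {}
--
--     # Loop through all the keys and object in orbit_dict and add them to the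
--     # orbit_graph
--     for obj_sun, obj_moon in orbit_dict.items():
--         orbit_graph.setdefault(obj_sun, []).append(obj_moon)
--         orbit_graph.setdefault(obj_moon, []).append(obj_sun)
--
--     # Sort the lists so they're easier to test
--     for key, value in orbit_graph.items():
--         orbit_graph[key] = sorted(value)
--
--     return orbit_graph
-- ===== SOURCE B (Python) =====
-- def build_orbit_graph(orbit_dict):
--     """Alternative decomposition: flatten to one list of directed edge pairs,
--     sort it lexicographically, slice it into runs of equal first component
--     (each run's second components already sorted), then emit the runs keyed in
--     first-occurrence order of the pair sources."""
--     pairs = []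
--     for sun, moon in orbit_dict.items():
--         pairs.append((sun, moon))
--         pairs.append((moon, sun))
--     sp = sorted(pairs)
--     runs = []
--     i = 0
--     while i < len(sp):
--         j = i + 1
--         while j < len(sp) and sp[j][0] == sp[i][0]:
--             j += 1
--         runs.append((sp[i][0], [b for _, b in sp[i:j]]))
--         i = j
--     grouped = dict(runs)
--     return {a: grouped[a] for a in dict.fromkeys(a for a, _ in pairs)}
-- ===== Notes on version B (the rewrite author's own statement) =====
-- stated objective: alternative
-- what changed: A builds the adjacency dict incrementally with two setdefault/append calls per edge and then re-sorts every value in a second pass over the dict; B flattens the dict into one list of directed edge pairs, sorts that list lexicographically once, slices it into runs of equal source (whose neighbour lists are then already sorted), and emits the runs keyed in first-occurrence order of the pair sources.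
import Mathlib
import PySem

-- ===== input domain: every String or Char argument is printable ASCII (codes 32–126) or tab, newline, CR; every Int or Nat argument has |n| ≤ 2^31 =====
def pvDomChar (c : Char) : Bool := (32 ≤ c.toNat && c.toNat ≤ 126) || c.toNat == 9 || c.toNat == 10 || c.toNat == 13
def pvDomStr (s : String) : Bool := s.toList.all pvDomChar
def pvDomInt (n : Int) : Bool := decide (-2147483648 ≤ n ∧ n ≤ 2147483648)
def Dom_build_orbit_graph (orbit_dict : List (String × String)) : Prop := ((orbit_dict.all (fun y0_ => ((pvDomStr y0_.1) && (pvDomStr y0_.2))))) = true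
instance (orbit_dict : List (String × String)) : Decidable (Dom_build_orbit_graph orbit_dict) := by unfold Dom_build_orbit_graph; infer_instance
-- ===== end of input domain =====

-- B replaces A's per-edge setdefault/append dict building (plus a second
-- sort-each-value pass) by: flatten to a list of directed edge pairs, sort it
-- lexicographically once, slice it into runs of equal source, and emit the runs
-- keyed in first-occurrence order of the pair sources (alternative algorithm,
-- same result).

-- ===== PORT A =====
-- setdefault(k, []).append(v) on a dict of lists is exactly Dict.modify k [] (· ++ [v])
def build_orbit_graph (orbit_dict : List (String × String)) : List (String × List String) :=
  let g : PySem.Dict String (List String) :=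
    orbit_dict.foldl
      (fun g p => ((g.modify p.1 [] (· ++ [p.2])).modify p.2 [] (· ++ [p.1])))
      PySem.Dict.empty
  -- for key, value in orbit_graph.items(): orbit_graph[key] = sorted(value)
  let g2 :=
    g.items.foldl (fun d kv => d.insert kv.1 (PySem.List.sorted kv.2 (fun x => x) false)) g
  g2.items

-- ===== PORT B =====
-- the while/while loop of Source B: slice the sorted pair list into maximal runs
-- with equal first component (inner while = takeWhile/dropWhile on the tail)
def groupRuns : List (String × String) → List (String × List String)
  | [] => []
  | (a, b) :: t =>
    let run := t.takeWhile (fun p => p.1 == a)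
    let rest := t.dropWhile (fun p => p.1 == a)
    (a, b :: run.map (·.2)) :: groupRuns rest
termination_by l => l.length
decreasing_by
  simp only [List.length_cons]
  exact Nat.lt_succ_of_le (List.length_dropWhile_le _ _)

def build_orbit_graph_alt (orbit_dict : List (String × String)) : List (String × List String) :=
  let pairs := orbit_dict.flatMap (fun p => [(p.1, p.2), (p.2, p.1)])
  -- sorted(pairs): lexicographic tuple sort
  let sp := PySem.List.sorted2 pairs (·.1) (·.2) false
  let grouped := PySem.Dict.ofList (groupRuns sp)
  let keys := PySem.List.dedup (pairs.map (·.1))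
  -- grouped[a] in Source B never raises: every pair source occurs in some run
  let d := keys.foldl (fun d a => d.insert a (grouped.getD a [])) PySem.Dict.empty
  d.items

-- ===== PRECONDITION & SPEC =====
def Spec_build_orbit_graph (orbit_dict : List (String × String)) (out : List (String × List String)) : Prop := out = build_orbit_graph_alt orbit_dict
instance (orbit_dict : List (String × String)) (out : List (String × List String)) : Decidable (Spec_build_orbit_graph orbit_dict out) := by unfold Spec_build_orbit_graph; infer_instance

-- ===== CLAIM (what is proved, stated in full; the proofs are below) =====
def Claim_equal_build_orbit_graph : Prop := ∀ (orbit_dict : List (String × String)), Dom_build_orbit_graph orbit_dict → Spec_build_orbit_graph orbit_dict (build_orbit_graph orbit_dict)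

-- ===== LEMMAS AND PROOFS =====

-- the lexicographic order the sorted pair list satisfies
def PairLe (p q : String × String) : Prop := p.1 < q.1 ∨ (p.1 = q.1 ∧ p.2 ≤ q.2)

lemma PairLe_trans {p q r : String × String} (h1 : PairLe p q) (h2 : PairLe q r) :
    PairLe p r := by
  revert h1 h2; rintro (h1 | ⟨h1, h1'⟩) (h2 | ⟨h2, h2'⟩)
  · exact Or.inl (lt_trans h1 h2)
  · exact Or.inl (h2 ▸ h1)
  · exact Or.inl (h1 ▸ h2)
  · exact Or.inr ⟨h1.trans h2, h1'.trans h2'⟩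

lemma PairLe_fst_le {p q : String × String} (h : PairLe p q) : p.1 ≤ q.1 := by
  rcases h with h | ⟨h, _⟩
  · exact le_of_lt h
  · exact le_of_eq h

lemma pairwise_insertBy (before : String × String → String × String → Bool)
    (hb : ∀ a b, before a b = true → PairLe a b)
    (hnb : ∀ a b, before a b = false → PairLe b a)
    (x : String × String) (l : List (String × String)) (hl : l.Pairwise PairLe) :
    (PySem.List.insertBy before x l).Pairwise PairLe := by
  induction l with
  | nil => simp [PySem.List.insertBy]
  | cons y ys ih =>
    have heq : PySem.List.insertBy before x (y :: ys)
        = if before x y then x :: y :: ys else y :: PySem.List.insertBy before x ys := by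
      simp [PySem.List.insertBy]
    rw [heq]
    rcases List.pairwise_cons.mp hl with ⟨hy, hys⟩
    split
    · rename_i htrue
      refine List.pairwise_cons.mpr ⟨?_, hl⟩
      intro z hz
      rcases List.mem_cons.mp hz with rfl | hz
      · exact hb _ _ htrue
      · exact PairLe_trans (hb _ _ htrue) (hy z hz)
    · rename_i hfalse
      refine List.pairwise_cons.mpr ⟨?_, ih hys⟩
      intro z hz
      rcases (PySem.List.mem_insertBy before x z ys).mp hz with rfl | hz
      · exact hnb _ _ (Bool.eq_false_iff.mpr hfalse)
      · exact hy z hz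

lemma pairwise_sorted2 (pairs : List (String × String)) :
    (PySem.List.sorted2 pairs (·.1) (·.2) false).Pairwise PairLe := by
  have hb : ∀ a b : String × String,
      (decide (a.1 < b.1) || (!decide (b.1 < a.1) && decide (a.2 < b.2))) = true → PairLe a b := by
    intro a b h
    rcases Bool.or_eq_true_iff.mp h with h | h
    · exact Or.inl (of_decide_eq_true h)
    · rcases Bool.and_eq_true_iff.mp h with ⟨h1, h2⟩
      have h1' : ¬ b.1 < a.1 := of_decide_eq_false (Bool.not_eq_true' .. ▸ h1)
      rcases lt_or_eq_of_le (not_lt.mp h1') with hlt | heq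
      · exact Or.inl hlt
      · exact Or.inr ⟨heq, le_of_lt (of_decide_eq_true h2)⟩
  have hnb : ∀ a b : String × String,
      (decide (a.1 < b.1) || (!decide (b.1 < a.1) && decide (a.2 < b.2))) = false → PairLe b a := by
    intro a b h
    rcases Bool.or_eq_false_iff.mp h with ⟨h1, h2⟩
    have h1' : ¬ a.1 < b.1 := of_decide_eq_false h1
    rcases lt_or_eq_of_le (not_lt.mp h1') with hlt | heq
    · exact Or.inl hlt
    · rcases Bool.and_eq_false_iff.mp h2 with h3 | h3
      · exact absurd (of_decide_eq_true (Bool.not_eq_false' .. ▸ h3)) (heq ▸ lt_irrefl _)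
      · exact Or.inr ⟨heq, not_lt.mp (of_decide_eq_false h3)⟩
  show (pairs.foldl (fun acc x => PySem.List.insertBy _ x acc) []).Pairwise PairLe
  generalize hacc : ([] : List (String × String)) = acc
  have hp : acc.Pairwise PairLe := by rw [← hacc]; exact List.Pairwise.nil
  clear hacc
  induction pairs generalizing acc with
  | nil => exact hp
  | cons p t ih => exact ih _ (pairwise_insertBy _ hb hnb p acc hp)

-- after the run of a's is dropped, no pair with first component a remains
lemma dropWhile_fst_ne (a b : String) (t : List (String × String))
    (hp : ((a, b) :: t).Pairwise PairLe) :
    ∀ z ∈ t.dropWhile (fun p => p.1 == a), z.1 ≠ a := by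
  induction t with
  | nil => simp
  | cons y ys ih =>
    rcases List.pairwise_cons.mp hp with ⟨hhead, ht⟩
    rcases List.pairwise_cons.mp ht with ⟨hy, hys⟩
    by_cases hya : y.1 = a
    · rw [List.dropWhile_cons_of_pos (by simp [hya])]
      exact ih (List.pairwise_cons.mpr
        ⟨fun z hz => hhead z (List.mem_cons_of_mem _ hz), hys⟩)
    · rw [List.dropWhile_cons_of_neg (by simp [hya])]
      intro z hz
      rcases List.mem_cons.mp hz with rfl | hz
      · exact hya
      · have hay : a < y.1 := by
          rcases hhead y (List.mem_cons_self ..) with h | ⟨h, _⟩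
          · exact h
          · exact absurd h.symm hya
        have hyz : y.1 ≤ z.1 := PairLe_fst_le (hy z hz)
        exact fun hc => lt_irrefl a (lt_of_lt_of_le hay (hc ▸ hyz))

lemma filter_head_run (a b : String) (t : List (String × String))
    (hp : ((a, b) :: t).Pairwise PairLe) :
    ((a, b) :: t).filter (fun p => p.1 == a)
      = (a, b) :: t.takeWhile (fun p => p.1 == a) := by
  rw [List.filter_cons_of_pos (by simp)]
  congr 1
  conv_lhs => rw [← List.takeWhile_append_dropWhile (p := fun p => p.1 == a) (l := t)]
  rw [List.filter_append]
  have h1 : (t.takeWhile (fun p => p.1 == a)).filter (fun p => p.1 == a)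
      = t.takeWhile (fun p => p.1 == a) := by
    apply List.filter_eq_self.mpr
    intro z hz
    exact List.mem_takeWhile_imp (p := fun p : String × String => p.1 == a) hz
  have h2 : (t.dropWhile (fun p => p.1 == a)).filter (fun p => p.1 == a) = [] := by
    apply List.filter_eq_nil_iff.mpr
    intro z hz
    simpa using dropWhile_fst_ne a b t hp z hz
  rw [h1, h2, List.append_nil]

lemma filter_tail_ne (a b k : String) (t : List (String × String)) (hk : k ≠ a) :
    ((a, b) :: t).filter (fun p => p.1 == k)
      = (t.dropWhile (fun p => p.1 == a)).filter (fun p => p.1 == k) := by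
  rw [List.filter_cons_of_neg (p := fun p : String × String => p.1 == k)
      (by simp only [beq_iff_eq]; exact fun h => hk h.symm)]
  conv_lhs => rw [← List.takeWhile_append_dropWhile (p := fun p => p.1 == a) (l := t)]
  rw [List.filter_append]
  have h1 : (t.takeWhile (fun p => p.1 == a)).filter (fun p => p.1 == k) = [] := by
    apply List.filter_eq_nil_iff.mpr
    intro z hz
    have := List.mem_takeWhile_imp hz
    simp only [beq_iff_eq] at this ⊢
    exact fun hc => hk (hc ▸ this)
  rw [h1, List.nil_append]

lemma mem_fst_groupRuns (sp : List (String × String)) (k : String)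
    (h : k ∈ (groupRuns sp).map (·.1)) : ∃ p ∈ sp, p.1 = k := by
  induction sp using groupRuns.induct with
  | case1 => simp [groupRuns] at h
  | case2 a b t rest ih =>
    rw [groupRuns] at h
    simp only [List.map_cons, List.mem_cons] at h
    rcases h with rfl | h
    · exact ⟨(k, b), List.mem_cons_self .., rfl⟩
    · rcases ih h with ⟨p, hp, hpk⟩
      exact ⟨p, List.mem_cons_of_mem _ ((List.dropWhile_sublist _).mem hp), hpk⟩

lemma nodup_fst_groupRuns (sp : List (String × String)) (hp : sp.Pairwise PairLe) :
    ((groupRuns sp).map (·.1)).Nodup := by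
  induction sp using groupRuns.induct with
  | case1 => simp [groupRuns]
  | case2 a b t rest ih =>
    rw [groupRuns]
    simp only [List.map_cons, List.nodup_cons]
    constructor
    · intro hmem
      rcases mem_fst_groupRuns _ _ hmem with ⟨p, hpmem, hpk⟩
      exact dropWhile_fst_ne a b t hp p hpmem hpk
    · exact ih (hp.sublist ((List.dropWhile_sublist _).trans (List.sublist_cons_self _ _)))

lemma mem_groupRuns (sp : List (String × String)) (hp : sp.Pairwise PairLe)
    (k : String) (hne : sp.filter (fun p => p.1 == k) ≠ []) :
    (k, (sp.filter (fun p => p.1 == k)).map (·.2)) ∈ groupRuns sp := by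
  induction sp using groupRuns.induct with
  | case1 => simp at hne
  | case2 a b t rest ih =>
    rw [groupRuns]
    by_cases hk : k = a
    · subst hk
      rw [filter_head_run k b t hp]
      simp
    · rw [filter_tail_ne a b k t hk] at hne ⊢
      exact List.mem_cons_of_mem _
        (ih (hp.sublist ((List.dropWhile_sublist _).trans (List.sublist_cons_self _ _))) hne)

-- The two-modify fold over the dict items equals the one-modify fold over the
-- flattened pair list.
lemma groupFold_eq (orbit_dict : List (String × String))
    (d : PySem.Dict String (List String)) :
    orbit_dict.foldl
      (fun g p => ((g.modify p.1 [] (· ++ [p.2])).modify p.2 [] (· ++ [p.1])))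
      d
    = (orbit_dict.flatMap (fun p => [(p.1, p.2), (p.2, p.1)])).foldl
        (fun d p => d.modify p.1 [] (· ++ [p.2])) d := by
  induction orbit_dict generalizing d with
  | nil => rfl
  | cons p t ih => simp only [List.foldl_cons, List.flatMap_cons, List.foldl_append, ih]; rfl

lemma find?_beq_self (l : List String) (k : String) (h : k ∈ l) :
    l.find? (fun j => j == k) = some k := by
  induction l with
  | nil => simp at h
  | cons a t ih =>
    rcases List.mem_cons.mp h with h | h
    · simp [h]
    · by_cases ha : a == k
      · simp [ha]; exact beq_iff_eq.mp ha
      · simp [ha, ih h]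

lemma set_update_self (s : List String) : PySem.Set.update s s = s := by
  rw [PySem.Set.update_eq_append_filter]
  simp [PySem.Set.contains, List.filter_eq_nil_iff, PySem.Set.mem_ofList]

-- After the update loop, getD k is determined by the last pair with key k.
lemma getD_update_loop (l : List (String × List String))
    (d : PySem.Dict String (List String)) (k : String) :
    (l.foldl (fun d kv => d.insert kv.1 (PySem.List.sorted kv.2 (fun x => x) false)) d).getD k []
    = match l.reverse.find? (fun kv => kv.1 == k) with
      | some kv => PySem.List.sorted kv.2 (fun x => x) false
      | none => d.getD k [] := by
  induction l generalizing d with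
  | nil => rfl
  | cons kv t ih =>
    simp only [List.foldl_cons, List.reverse_cons, List.find?_append, ih]
    cases hf : t.reverse.find? (fun kv => kv.1 == k) with
    | some kv' => simp
    | none =>
      simp only [Option.none_or, List.find?_cons]
      rw [PySem.Dict.getD_insert]
      by_cases hk : k = kv.1
      · simp [hk]
      · have hb : (kv.1 == k) = false := by
          simp only [beq_eq_false_iff_ne, ne_eq]
          exact fun h => hk h.symm
        simp [hk, hb]

-- ===== VERDICT (by name: the statement is the Claim_ definition above) =====
theorem build_orbit_graph_spec : Claim_equal_build_orbit_graph := by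
  intro od _
  unfold Spec_build_orbit_graph build_orbit_graph build_orbit_graph_alt
  simp only [groupFold_eq]
  set pairs := od.flatMap (fun p => [(p.1, p.2), (p.2, p.1)]) with hpairs
  set g : PySem.Dict String (List String) :=
    pairs.foldl (fun d p => d.modify p.1 [] (· ++ [p.2])) PySem.Dict.empty with hg
  -- keys of g
  have hkeys : g.keys = PySem.List.dedup (pairs.map (·.1)) := by
    rw [hg, PySem.Dict.keys_foldl_modify_key pairs (fun p => p.1) [] (fun _ p v => v ++ [p.2]),
        PySem.Dict.keys_empty, PySem.Set.update_nil_left, PySem.List.dedup_eq_ofList]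
  have hnodup : g.keys.Nodup := by
    rw [hg]
    exact PySem.Dict.nodup_keys_foldl_modify_key pairs (fun p => p.1) [] _ _
      PySem.Dict.nodup_keys_empty
  have hgetD : ∀ k, g.getD k [] = (pairs.filter (fun p => p.1 == k)).map (·.2) := by
    intro k
    rw [hg, PySem.Dict.getD_foldl_modify_append, PySem.Dict.getD_empty]
    rfl
  -- the sorted pair list and its run decomposition (B's side)
  set sp := PySem.List.sorted2 pairs (·.1) (·.2) false with hsp
  have hpw : sp.Pairwise PairLe := pairwise_sorted2 pairs
  set grouped := PySem.Dict.ofList (groupRuns sp) with hgrouped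
  have hgitems : grouped.items = groupRuns sp := by
    rw [hgrouped]
    have h := PySem.Dict.items_foldl_insert_fresh (groupRuns sp) (fun p => p.1)
      (fun p => p.2) PySem.Dict.empty (fun a _ => PySem.Dict.contains_empty _)
      (nodup_fst_groupRuns sp hpw)
    show (List.foldl (fun acc p => acc.insert p.1 p.2) PySem.Dict.empty (groupRuns sp)).items
      = groupRuns sp
    simpa [PySem.Dict.empty] using h
  have hgkeysnd : grouped.keys.Nodup := by
    show (grouped.items.map (·.1)).Nodup
    rw [hgitems]
    exact nodup_fst_groupRuns sp hpw
  -- value of B's lookup for every key that occurs among the pair sources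
  have hlook : ∀ k ∈ pairs.map (·.1),
      grouped.getD k []
        = PySem.List.sorted ((pairs.filter (fun p => p.1 == k)).map (·.2)) (fun x => x) false := by
    intro k hk
    have hperm : sp.Perm pairs := PySem.List.sorted2_perm pairs _ _ false
    have hne : sp.filter (fun p => p.1 == k) ≠ [] := by
      rcases List.mem_map.mp hk with ⟨p, hp, hpk⟩
      intro hc
      have : p ∈ sp.filter (fun p => p.1 == k) :=
        List.mem_filter.mpr ⟨hperm.mem_iff.mpr hp, by simp [hpk]⟩
      simp [hc] at this
    have hmem := mem_groupRuns sp hpw k hne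
    have hval : grouped.getD k [] = (sp.filter (fun p => p.1 == k)).map (·.2) :=
      PySem.Dict.getD_of_mem_items grouped (hgitems ▸ hmem) hgkeysnd []
    rw [hval]
    have hpwf : (sp.filter (fun p => p.1 == k)).Pairwise (fun p q => p.2 ≤ q.2) := by
      refine List.Pairwise.imp_of_mem ?_ (hpw.sublist List.filter_sublist)
      intro p q hpmem hqmem hle
      have hpk : p.1 = k := by simpa using (List.mem_filter.mp hpmem).2
      have hqk : q.1 = k := by simpa using (List.mem_filter.mp hqmem).2
      rcases hle with h | ⟨_, h⟩
      · rw [hpk, hqk] at h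
        exact absurd h (lt_irrefl k)
      · exact h
    exact (PySem.List.sorted_id_eq_of_perm_of_pairwise _ _
      ((hperm.filter _).map _) (List.pairwise_map.mpr hpwf)).symm
  -- B's output as a map over the dedup'd keys
  have hrhs :
      (List.foldl (fun d a => d.insert a (grouped.getD a []))
        PySem.Dict.empty (PySem.List.dedup (pairs.map (·.1)))).items
      = (PySem.List.dedup (pairs.map (·.1))).map (fun k => (k, grouped.getD k [])) := by
    rw [PySem.Dict.items_foldl_insert_fresh _ (fun k => k) _ _
        (fun a _ => PySem.Dict.contains_empty a) (by simp)]
    simp [PySem.Dict.empty]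
  -- A's output as a map over the same keys
  set g2 := g.items.foldl
    (fun d kv => d.insert kv.1 (PySem.List.sorted kv.2 (fun x => x) false)) g with hg2
  have hitems : g.items = g.keys.map (fun k => (k, g.getD k [])) :=
    PySem.Dict.items_eq_map_keys g hnodup []
  have hkeys2 : g2.keys = g.keys := by
    rw [hg2, PySem.Dict.keys_foldl_insert_key g.items (fun kv => kv.1)
      (fun _ kv => PySem.List.sorted kv.2 (fun x => x) false) g]
    have : g.items.map (fun kv => kv.1) = g.keys := rfl
    rw [this, set_update_self]
  have hnodup2 : g2.keys.Nodup := by rw [hkeys2]; exact hnodup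
  have hfind : ∀ k ∈ g.keys,
      g.items.reverse.find? (fun kv => kv.1 == k) = some (k, g.getD k []) := by
    intro k hk
    rw [hitems, ← List.map_reverse, List.find?_map]
    have : ((fun kv : String × List String => kv.1 == k) ∘ (fun j => (j, g.getD j [])))
        = fun j => j == k := rfl
    rw [this, find?_beq_self _ _ (List.mem_reverse.mpr hk)]
    rfl
  have hget2 : ∀ k ∈ g.keys,
      g2.getD k [] = PySem.List.sorted (g.getD k []) (fun x => x) false := by
    intro k hk
    rw [hg2, getD_update_loop, hfind k hk]
  rw [PySem.Dict.items_eq_map_keys g2 hnodup2 [], hkeys2, hrhs, ← hkeys]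
  apply List.map_congr_left
  intro k hk
  have hk' : k ∈ pairs.map (·.1) := by
    have := (PySem.List.mem_dedup (pairs.map (·.1)) k).mp (hkeys ▸ hk)
    simpa using this
  rw [hget2 k hk, hgetD k, hlook k hk']
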